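-- pv_equiv track=rewrite | github.com/srilakshmip03/CS-313E | A9/recursion2.py | split53Helper
-- ===== SOURCE A (Python) =====
-- def split53Helper(start, nums, sum_fives, sum_threes):
--     # base case
--     if (start >= len(nums)):
--         return (sum_fives == sum_threes)
--
--     # add number to sum_fives if it is a multiple of 5
--     elif (nums[start] % 5 == 0):
--         return split53Helper(start + 1, nums, sum_fives + nums[start], sum_threes)
--
--     # add to sum_threes if it's a multiple of 3 and not 5
--     elif (nums[start] % 3 == 0):
--         return split53Helper(start + 1, nums, sum_fives, sum_threes + nums[start])
--
--     # if neither, regular subset path where you either add it to a set or you don't, continuing down all possibilites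
--     else:
--         return split53Helper(start + 1, nums, sum_fives + nums[start], sum_threes) or split53Helper(start + 1, nums, sum_fives, sum_threes + nums[start])
-- ===== SOURCE B (Python) =====
-- def split53Helper(start, nums, sum_fives, sum_threes):
--     # Iterative DP: track the set of reachable (fives - threes) differences.
--     reachable = {sum_fives - sum_threes}
--     for i in range(start, len(nums)):
--         x = nums[i]
--         if x % 5 == 0:
--             reachable = {d + x for d in reachable}
--         elif x % 3 == 0:
--             reachable = {d - x for d in reachable}
--         else:
--             reachable = {d + x for d in reachable} | {d - x for d in reachable}
--     return 0 in reachable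
-- ===== Notes on version B (the rewrite author's own statement) =====
-- stated objective: alternative
-- what changed: Replaces the branching recursion over two running sums by a single forward loop maintaining the set of reachable (fives minus threes) differences and testing 0 at the end; Pre_ excludes only start < -len(nums), where both programs raise IndexError.
import Mathlib
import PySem

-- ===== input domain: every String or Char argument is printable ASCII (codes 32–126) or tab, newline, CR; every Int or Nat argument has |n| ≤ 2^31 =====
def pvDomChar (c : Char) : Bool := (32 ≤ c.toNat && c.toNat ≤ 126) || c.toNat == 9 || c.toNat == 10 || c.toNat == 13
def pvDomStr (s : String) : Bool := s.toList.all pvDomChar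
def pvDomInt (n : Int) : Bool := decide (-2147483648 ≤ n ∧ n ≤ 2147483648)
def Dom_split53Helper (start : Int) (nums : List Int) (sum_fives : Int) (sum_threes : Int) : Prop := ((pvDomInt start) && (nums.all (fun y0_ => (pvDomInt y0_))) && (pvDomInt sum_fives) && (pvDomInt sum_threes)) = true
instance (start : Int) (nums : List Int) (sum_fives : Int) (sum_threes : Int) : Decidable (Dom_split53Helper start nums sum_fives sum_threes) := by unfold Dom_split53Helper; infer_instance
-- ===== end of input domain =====

-- B replaces A's branching recursion over two running sums by a single index loop maintaining the
-- set of reachable (fives minus threes) differences (objective: alternative algorithm).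

-- ===== PORT A =====
def split53Helper (start : Int) (nums : List Int) (sum_fives : Int) (sum_threes : Int) : Bool :=
  if (nums.length : Int) ≤ start then sum_fives == sum_threes
  else
    -- nums[start]; outside Pre_ (IndexError in Python) the .getD 0 default is never claimed
    let x := (PySem.List.pyGet? nums start).getD 0
    if x % 5 == 0 then split53Helper (start + 1) nums (sum_fives + x) sum_threes
    else if x % 3 == 0 then split53Helper (start + 1) nums sum_fives (sum_threes + x)
    else split53Helper (start + 1) nums (sum_fives + x) sum_threes
      || split53Helper (start + 1) nums sum_fives (sum_threes + x)
termination_by ((nums.length : Int) - start).toNat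
decreasing_by all_goals omega

-- ===== PORT B =====
-- one loop step: update the set of reachable differences with element x
def stepB (vis : PySem.Set Int) (x : Int) : PySem.Set Int :=
  if x % 5 == 0 then PySem.Set.ofList (vis.map (· + x))
  else if x % 3 == 0 then PySem.Set.ofList (vis.map (· - x))
  else PySem.Set.union (PySem.Set.ofList (vis.map (· + x))) (PySem.Set.ofList (vis.map (· - x)))

def split53Helper_alt (start : Int) (nums : List Int) (sum_fives : Int) (sum_threes : Int) : Bool :=
  let reachable := (PySem.List.pyRange start (nums.length : Int) 1).foldl
    (fun vis i => stepB vis ((PySem.List.pyGet? nums i).getD 0))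
    (PySem.Set.ofList [sum_fives - sum_threes])
  PySem.Set.contains reachable 0

-- ===== PRECONDITION & SPEC =====
-- Pre_ excludes exactly the inputs with start < -len(nums), on which BOTH Python A and Python B
-- raise IndexError (nums[start] / nums[i] out of range).
def Pre_split53Helper (start : Int) (nums : List Int) (sum_fives : Int) (sum_threes : Int) : Prop :=
  -(nums.length : Int) ≤ start
instance (start : Int) (nums : List Int) (sum_fives : Int) (sum_threes : Int) : Decidable (Pre_split53Helper start nums sum_fives sum_threes) := by unfold Pre_split53Helper; infer_instance
def pvWitness_split53Helper : Int × List Int × Int × Int := (0, [5, 3, 1, 7], 0, 0)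

def Spec_split53Helper (start : Int) (nums : List Int) (sum_fives : Int) (sum_threes : Int) (out : Bool) : Prop := out = split53Helper_alt start nums sum_fives sum_threes
instance (start : Int) (nums : List Int) (sum_fives : Int) (sum_threes : Int) (out : Bool) : Decidable (Spec_split53Helper start nums sum_fives sum_threes out) := by unfold Spec_split53Helper; infer_instance

-- ===== CLAIM (what is proved, stated in full; the proofs are below) =====
def Claim_equal_split53Helper : Prop := ∀ (start : Int) (nums : List Int) (sum_fives : Int) (sum_threes : Int), Dom_split53Helper start nums sum_fives sum_threes → Pre_split53Helper start nums sum_fives sum_threes → Spec_split53Helper start nums sum_fives sum_threes (split53Helper start nums sum_fives sum_threes)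

-- ===== LEMMAS AND PROOFS =====

-- the sequence of elements the recursion visits (Python's negative index wraps once)
def procList (start : Int) (nums : List Int) : List Int :=
  if (nums.length : Int) ≤ start then []
  else if start < 0 then nums.drop (nums.length + start).toNat ++ nums
  else nums.drop start.toNat

-- single-difference version of A's recursion, over the visited list
def dpD : List Int → Int → Bool
  | [], d => d == 0
  | x :: xs, d =>
    if x % 5 == 0 then dpD xs (d + x)
    else if x % 3 == 0 then dpD xs (d - x)
    else dpD xs (d + x) || dpD xs (d - x)

theorem procList_cons (start : Int) (nums : List Int)
    (h1 : -(nums.length : Int) ≤ start) (h2 : start < (nums.length : Int)) :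
    procList start nums = (PySem.List.pyGet? nums start).getD 0 :: procList (start + 1) nums := by
  unfold procList
  rw [if_neg (by omega)]
  by_cases hn : start < 0
  · rw [if_pos hn]
    have hlt : (↑nums.length + start).toNat < nums.length := by omega
    have hget : PySem.List.pyGet? nums start = some nums[(↑nums.length + start).toNat] := by
      simp only [PySem.List.pyGet?, PySem.List.pyIdx?, if_neg (show ¬ 0 ≤ start by omega),
        if_pos (show -(nums.length : Int) ≤ start from h1)]
      simp only [Option.bind_some, Option.bind]
      rw [show nums.length - (-start).toNat = (↑nums.length + start).toNat by omega]
      exact List.getElem?_eq_getElem hlt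
    rw [List.drop_eq_getElem_cons hlt, hget, Option.getD_some, List.cons_append]
    congr 1
    by_cases hn1 : start + 1 < 0
    · rw [if_neg (by omega), if_pos hn1]
      congr 2
      omega
    · rw [if_neg (by omega), if_neg hn1]
      have h0 : (start + 1).toNat = 0 := by omega
      rw [h0, show (↑nums.length + start).toNat + 1 = nums.length by omega,
        List.drop_length, List.nil_append, List.drop_zero]
  · rw [if_neg hn]
    have hlt : start.toNat < nums.length := by omega
    have hget : PySem.List.pyGet? nums start = some nums[start.toNat] :=
      PySem.List.pyGet?_eq_some_getElem nums (by omega) (by omega)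
    rw [List.drop_eq_getElem_cons hlt, hget, Option.getD_some]
    congr 1
    by_cases hb1 : (nums.length : Int) ≤ start + 1
    · rw [if_pos hb1, show start.toNat + 1 = nums.length by omega, List.drop_length]
    · rw [if_neg hb1, if_neg (by omega)]
      congr 1
      omega

theorem A_eq_dp (start : Int) (nums : List Int) (f t : Int)
    (h : -(nums.length : Int) ≤ start) :
    split53Helper start nums f t = dpD (procList start nums) (f - t) := by
  by_cases hb : (nums.length : Int) ≤ start
  · rw [split53Helper]
    simp only [hb, if_pos, procList, dpD]
    rcases eq_or_ne f t with hft | hft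
    · simp [hft]
    · simp [hft, sub_eq_zero]
  · rw [split53Helper, procList_cons start nums h (by omega)]
    simp only [hb, if_false]
    set x := (PySem.List.pyGet? nums start).getD 0 with hx
    by_cases h5 : (x % 5 == 0) = true
    · simp only [dpD, h5, if_true]
      rw [A_eq_dp (start + 1) nums (f + x) t (by omega),
        show f + x - t = f - t + x by ring]
    · by_cases h3 : (x % 3 == 0) = true
      · simp only [dpD, h5, h3, Bool.false_eq_true, if_false, if_true]
        rw [A_eq_dp (start + 1) nums f (t + x) (by omega),
          show f - (t + x) = f - t - x by ring]
      · simp only [dpD, h5, h3, Bool.false_eq_true, if_false]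
        rw [A_eq_dp (start + 1) nums (f + x) t (by omega),
          A_eq_dp (start + 1) nums f (t + x) (by omega),
          show f + x - t = f - t + x by ring,
          show f - (t + x) = f - t - x by ring]
termination_by ((nums.length : Int) - start).toNat
decreasing_by all_goals omega

-- membership after one step of B's loop
theorem mem_stepB (vis : PySem.Set Int) (x y : Int) :
    y ∈ stepB vis x ↔
      (if (x % 5 == 0) = true then ∃ d ∈ vis, y = d + x
       else if (x % 3 == 0) = true then ∃ d ∈ vis, y = d - x
       else (∃ d ∈ vis, y = d + x) ∨ (∃ d ∈ vis, y = d - x)) := by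
  unfold stepB
  split_ifs with h5 h3 <;>
    simp [PySem.Set.mem_ofList, PySem.Set.mem_union, List.mem_map, eq_comm]

-- 0 is reachable after folding B's step over L iff some seed difference solves dpD L
theorem fold_stepB_mem (L : List Int) (S : PySem.Set Int) :
    (0 ∈ L.foldl stepB S) ↔ ∃ d ∈ S, dpD L d = true := by
  induction L generalizing S with
  | nil =>
    simp only [List.foldl_nil, dpD, beq_iff_eq]
    constructor
    · intro h; exact ⟨0, h, rfl⟩
    · rintro ⟨d, hd, rfl⟩; exact hd
  | cons x xs ih =>
    rw [List.foldl_cons, ih]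
    constructor
    · rintro ⟨d, hd, hdp⟩
      rw [mem_stepB] at hd
      by_cases h5 : (x % 5 == 0) = true
      · rw [if_pos h5] at hd
        obtain ⟨e, he, rfl⟩ := hd
        exact ⟨e, he, by simp [dpD, h5, hdp]⟩
      · by_cases h3 : (x % 3 == 0) = true
        · rw [if_neg h5, if_pos h3] at hd
          obtain ⟨e, he, rfl⟩ := hd
          exact ⟨e, he, by simp [dpD, h5, h3, hdp]⟩
        · rw [if_neg h5, if_neg h3] at hd
          rcases hd with ⟨e, he, rfl⟩ | ⟨e, he, rfl⟩
          · exact ⟨e, he, by simp [dpD, h5, h3, hdp]⟩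
          · exact ⟨e, he, by simp [dpD, h5, h3, hdp]⟩
    · rintro ⟨e, he, hdp⟩
      by_cases h5 : (x % 5 == 0) = true
      · refine ⟨e + x, ?_, ?_⟩
        · rw [mem_stepB, if_pos h5]; exact ⟨e, he, rfl⟩
        · simpa [dpD, h5] using hdp
      · by_cases h3 : (x % 3 == 0) = true
        · refine ⟨e - x, ?_, ?_⟩
          · rw [mem_stepB, if_neg h5, if_pos h3]; exact ⟨e, he, rfl⟩
          · simpa [dpD, h5, h3] using hdp
        · simp only [dpD, h5, h3, Bool.false_eq_true, if_false, Bool.or_eq_true] at hdp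
          rcases hdp with hdp | hdp
          · refine ⟨e + x, ?_, hdp⟩
            rw [mem_stepB, if_neg h5, if_neg h3]; exact Or.inl ⟨e, he, rfl⟩
          · refine ⟨e - x, ?_, hdp⟩
            rw [mem_stepB, if_neg h5, if_neg h3]; exact Or.inr ⟨e, he, rfl⟩

-- the index range B folds over yields exactly procList's elements
theorem fold_range_eq (start : Int) (nums : List Int) (S : PySem.Set Int)
    (h : -(nums.length : Int) ≤ start) :
    (PySem.List.pyRange start (nums.length : Int) 1).foldl
      (fun vis i => stepB vis ((PySem.List.pyGet? nums i).getD 0)) S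
    = (procList start nums).foldl stepB S := by
  by_cases hb : (nums.length : Int) ≤ start
  · rw [PySem.List.pyRange_one_eq_nil hb]
    unfold procList
    rw [if_pos hb]
    rfl
  · rw [PySem.List.pyRange_one_cons (by omega), procList_cons start nums h (by omega),
      List.foldl_cons, List.foldl_cons,
      fold_range_eq (start + 1) nums _ (by omega)]
termination_by ((nums.length : Int) - start).toNat
decreasing_by all_goals omega

theorem B_eq_dp (start : Int) (nums : List Int) (f t : Int)
    (h : -(nums.length : Int) ≤ start) :
    split53Helper_alt start nums f t = dpD (procList start nums) (f - t) := by
  unfold split53Helper_alt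
  rw [fold_range_eq start nums _ h]
  rcases hB : dpD (procList start nums) (f - t) with _ | _
  · rw [Bool.eq_false_iff]
    intro hc
    have h0 := (PySem.Set.contains_iff _ _).mp hc
    obtain ⟨d, hd, hdp⟩ := (fold_stepB_mem _ _).mp h0
    simp [PySem.Set.mem_ofList] at hd
    rw [hd] at hdp
    rw [hdp] at hB
    exact absurd hB (by simp)
  · apply (PySem.Set.contains_iff _ _).mpr
    apply (fold_stepB_mem _ _).mpr
    exact ⟨f - t, by simp [PySem.Set.mem_ofList], hB⟩

-- ===== VERDICT (by name: the statement is the Claim_ definition above) =====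
theorem split53Helper_spec : Claim_equal_split53Helper := by
  intro start nums f t _ hpre
  unfold Spec_split53Helper
  rw [A_eq_dp start nums f t hpre, B_eq_dp start nums f t hpre]
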